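-- pv_equiv track=rewrite | github.com/jmanhype/ace-adaptive-code-evolution | demo_code/inefficient.py | slow_function
-- ===== SOURCE A (Python) =====
-- def slow_function(numbers):
--     """
--     A function with inefficient code that can be optimized.
--     """
--     result = []
--     for num in numbers:
--         # Inefficient string concatenation in a loop
--         text = ""
--         for i in range(num):
--             text += str(i) + ","
--
--         # Inefficient list append in a loop
--         squares = []
--         for i in range(num):
--             squares.append(i * i)
--
--         # Inefficient filtering
--         even_squares = []
--         for square in squares:
--             if square % 2 == 0:
--                 even_squares.append(square)
--
--         result.append((text, even_squares))
--
--     return result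
-- ===== SOURCE B (Python) =====
-- def slow_function(numbers):
--     """
--     A function with inefficient code that can be optimized.
--     """
--     return [
--         ("".join(str(i) + "," for i in range(num)),
--          [i * i for i in range(0, num, 2)])
--         for num in numbers
--     ]
-- ===== Notes on version B (the rewrite author's own statement) =====
-- stated objective: simpler
-- what changed: Per number, the three accumulator loops (string concatenation, squares list, even-filter pass) are replaced by a single join over range(num) and a direct comprehension over range(0, num, 2), using that i*i is even exactly when i is even, so the intermediate squares list and the filtering pass disappear.
import Mathlib
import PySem

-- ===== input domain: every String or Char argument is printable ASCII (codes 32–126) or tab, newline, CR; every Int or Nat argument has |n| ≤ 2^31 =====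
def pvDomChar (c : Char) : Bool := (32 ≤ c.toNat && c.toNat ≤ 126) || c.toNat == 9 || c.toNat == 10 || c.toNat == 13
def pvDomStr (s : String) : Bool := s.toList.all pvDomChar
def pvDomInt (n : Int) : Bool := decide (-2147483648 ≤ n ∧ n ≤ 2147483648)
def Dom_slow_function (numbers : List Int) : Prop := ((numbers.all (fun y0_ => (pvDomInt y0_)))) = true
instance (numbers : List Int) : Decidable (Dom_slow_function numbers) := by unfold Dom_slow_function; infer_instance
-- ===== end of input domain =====

-- B replaces A's three accumulator loops per number (string +=, squares append, even filter)
-- by one join over range(num) and a direct comprehension over range(0, num, 2) (simpler; i*i is even iff i is even).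

-- ===== PORT A =====
def slow_function (numbers : List Int) : List (String × List Int) :=
  numbers.foldl (fun result num =>
    -- text += str(i) + ","   (string built as List Char; wrapped with String.ofList at the end)
    let text : List Char :=
      (PySem.List.pyRange 0 num 1).foldl (fun t i => t ++ (PySem.Int.toChars i ++ [','])) []
    -- squares.append(i * i)
    let squares : List Int :=
      (PySem.List.pyRange 0 num 1).foldl (fun s i => s ++ [i * i]) []
    -- if square % 2 == 0: even_squares.append(square)
    let even_squares : List Int :=
      squares.foldl (fun es sq => if PySem.Int.mod sq 2 == 0 then es ++ [sq] else es) []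
    result ++ [(String.ofList text, even_squares)]) []

-- ===== PORT B =====
def slow_function_alt (numbers : List Int) : List (String × List Int) :=
  numbers.map (fun num =>
    -- "".join(str(i) + "," for i in range(num))
    (String.ofList (PySem.Chars.join []
        ((PySem.List.pyRange 0 num 1).map (fun i => PySem.Int.toChars i ++ [',']))),
     -- [i * i for i in range(0, num, 2)]
     (PySem.List.pyRange 0 num 2).map (fun i => i * i)))

-- ===== PRECONDITION & SPEC =====
def Spec_slow_function (numbers : List Int) (out : List (String × List Int)) : Prop := out = slow_function_alt numbers
instance (numbers : List Int) (out : List (String × List Int)) : Decidable (Spec_slow_function numbers out) := by unfold Spec_slow_function; infer_instance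

-- ===== CLAIM (what is proved, stated in full; the proofs are below) =====
def Claim_equal_slow_function : Prop := ∀ (numbers : List Int), Dom_slow_function numbers → Spec_slow_function numbers (slow_function numbers)

-- ===== LEMMAS AND PROOFS =====

-- ''.join with empty separator is concatenation
theorem chars_join_nil (xss : List (List Char)) : PySem.Chars.join [] xss = xss.flatten := by
  induction xss with
  | nil => rfl
  | cons x xs ih =>
    cases xs with
    | nil => simp [PySem.Chars.join, List.intercalate]
    | cons y ys =>
      simp only [PySem.Chars.join, List.intercalate, List.intersperse] at ih ⊢
      simp_all

-- the even squares among 0², …, (n-1)² are exactly the squares of 0, 2, 4, …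
theorem filter_even_squares (n : Nat) :
    ((List.range n).map (fun k : Nat => ((k : Int) * (k : Int)))).filter
        (fun sq => PySem.Int.mod sq 2 == 0) =
      (List.range ((n + 1) / 2)).map (fun k : Nat => ((2 * (k : Int)) * (2 * (k : Int)))) := by
  induction n with
  | zero => rfl
  | succ m ih =>
    rw [List.range_succ, List.map_append, List.filter_append, ih]
    by_cases h : 2 ∣ m
    · obtain ⟨j, rfl⟩ := h
      have hpred : PySem.Int.mod ((((2 * j : Nat) : Int)) * ((2 * j : Nat) : Int)) 2 == 0 := by
        simp
        exact ⟨(j : Int) * (2 * j), by ring⟩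
      have hcount : (2 * j + 1 + 1) / 2 = (2 * j + 1) / 2 + 1 := by omega
      rw [hcount, List.range_succ, List.map_append]
      simp only [List.map_cons, List.map_nil, List.filter_cons, hpred]
      have : (2 * j + 1) / 2 = j := by omega
      rw [this]
      push_cast
      simp [List.filter]
    · obtain ⟨j, hj⟩ : ∃ j, m = 2 * j + 1 := ⟨m / 2, by omega⟩
      subst hj
      have hpred : (PySem.Int.mod ((((2 * j + 1 : Nat) : Int)) * ((2 * j + 1 : Nat) : Int)) 2 == 0) = false := by
        have h2 : ((2 * j + 1 : Nat) : Int) * ((2 * j + 1 : Nat) : Int)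
            = 2 * (2 * (j : Int) * j + 2 * j) + 1 := by push_cast; ring
        rw [h2]
        simp only [beq_eq_false_iff_ne, ne_eq, PySem.Int.mod_eq_zero_iff_dvd]
        intro ⟨c, hc⟩
        omega
      have hcount : (2 * j + 1 + 1 + 1) / 2 = (2 * j + 1 + 1) / 2 := by omega
      rw [hcount]
      simp only [List.map_cons, List.map_nil, List.filter_cons, hpred, Bool.false_eq_true,
        if_false, List.filter_nil, List.append_nil]

-- range(0, num, 2) in terms of range(num)
theorem pyRange_two (num : Int) :
    PySem.List.pyRange 0 num 2 =
      (List.range ((num.toNat + 1) / 2)).map (fun k : Nat => (2 * (k : Int))) := by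
  rw [PySem.List.pyRange_of_pos 0 num (by norm_num)]
  have : (if (0 : Int) < num then ((num - 0 + 2 - 1) / 2).toNat else 0) = (num.toNat + 1) / 2 := by
    split_ifs with h <;> omega
  rw [this]
  simp

-- the two per-number bodies agree
theorem body_eq (num : Int) :
    ((PySem.List.pyRange 0 num 1).foldl
        (fun s i => s ++ [i * i]) ([] : List Int)).foldl
        (fun es sq => if PySem.Int.mod sq 2 == 0 then es ++ [sq] else es) [] =
      (PySem.List.pyRange 0 num 2).map (fun i => i * i) := by
  rw [PySem.List.foldl_append_singleton_eq_map, PySem.List.foldl_append_if_eq_filter,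
    PySem.List.pyRange_one, pyRange_two]
  simp only [List.nil_append, Int.sub_zero, List.map_map]
  have := filter_even_squares num.toNat
  simp only [Function.comp_def] at *
  simp only [zero_add]
  exact this

-- ===== VERDICT (by name: the statement is the Claim_ definition above) =====
theorem slow_function_spec : Claim_equal_slow_function := by
  intro numbers _
  unfold Spec_slow_function slow_function slow_function_alt
  rw [PySem.List.foldl_append_singleton_eq_map]
  simp only [List.nil_append]
  apply List.map_congr_left
  intro num _
  refine Prod.ext ?_ ?_
  · simp only
    rw [chars_join_nil, PySem.List.foldl_append_eq_flatMap, List.flatMap_def]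
    simp
  · simpa using body_eq num
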